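-- pv_equiv track=rewrite | github.com/chxrxn31L/numerical_methods | num_met.py | next_pattern_number
-- ===== SOURCE A (Python) =====
-- def next_pattern_number(n: int) -> int:
--     """Builds number of form 123...n...(n-1)...321."""
--     if n > 9:
--         forward = "".join(str(i) for i in range(1, 10))
--         forward += "".join(str(i) for i in range(10, n+1))
--     else:
--         forward = "".join(str(i) for i in range(1, n+1))
--
--     if n > 9:
--         backward = "".join(str(i) for i in range(n-1, 9, -1))
--         backward += "".join(str(i) for i in range(9, 0, -1))
--     else:
--         backward = "".join(str(i) for i in range(n-1, 0, -1))
--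
--     return int(forward + backward)
-- ===== SOURCE B (Python) =====
-- def next_pattern_number(n: int) -> int:
--     s = str(n)
--     for i in range(n - 1, 0, -1):
--         t = str(i)
--         s = t + s + t
--     return int(s)
-- ===== Notes on version B (the rewrite author's own statement) =====
-- stated objective: alternative
-- what changed: Replaces A's four staged range/join passes and the n>9 case split with a single middle-out loop that starts from str(n) and wraps each smaller number around both ends of the accumulated string at once.
import Mathlib
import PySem

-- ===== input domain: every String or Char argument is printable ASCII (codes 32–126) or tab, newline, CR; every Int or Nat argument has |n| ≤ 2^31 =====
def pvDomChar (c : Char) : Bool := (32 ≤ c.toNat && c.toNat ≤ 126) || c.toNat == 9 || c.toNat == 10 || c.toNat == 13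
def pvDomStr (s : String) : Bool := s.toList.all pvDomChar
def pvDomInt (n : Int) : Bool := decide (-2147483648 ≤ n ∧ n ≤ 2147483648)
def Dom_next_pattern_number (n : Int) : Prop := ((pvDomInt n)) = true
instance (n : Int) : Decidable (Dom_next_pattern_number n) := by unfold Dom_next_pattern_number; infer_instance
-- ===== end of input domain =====

-- B replaces A's four staged range/join passes and the n>9 case split with one
-- middle-out loop wrapping each number around both ends of the accumulated
-- string at once (objective: alternative decomposition).

-- ===== PORT A =====
-- literal transliteration of A; `int(...)` is PySem.Int.ofStr?, whose `none`
-- (Python ValueError: empty string for n ≤ 0) is outside Pre_; `.getD 0` is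
-- unreachable under Pre_.
def next_pattern_number (n : Int) : Int :=
  let forward :=
    if n > 9 then
      PySem.Str.join "" ((PySem.List.pyRange 1 10 1).map PySem.Int.toStr)
        ++ PySem.Str.join "" ((PySem.List.pyRange 10 (n+1) 1).map PySem.Int.toStr)
    else
      PySem.Str.join "" ((PySem.List.pyRange 1 (n+1) 1).map PySem.Int.toStr)
  let backward :=
    if n > 9 then
      PySem.Str.join "" ((PySem.List.pyRange (n-1) 9 (-1)).map PySem.Int.toStr)
        ++ PySem.Str.join "" ((PySem.List.pyRange 9 0 (-1)).map PySem.Int.toStr)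
    else
      PySem.Str.join "" ((PySem.List.pyRange (n-1) 0 (-1)).map PySem.Int.toStr)
  (PySem.Int.ofStr? (forward ++ backward)).getD 0

-- ===== PORT B =====
-- literal transliteration of Source B: the for-loop over range(n-1, 0, -1) is a
-- foldl on the same accumulator string (kept as List Char, the PySem carrier).
def next_pattern_number_alt (n : Int) : Int :=
  let s := (PySem.List.pyRange (n-1) 0 (-1)).foldl
    (fun s i => PySem.Int.toChars i ++ s ++ PySem.Int.toChars i) (PySem.Int.toChars n)
  (PySem.Int.ofStr? (String.ofList s)).getD 0

-- ===== PRECONDITION & SPEC =====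
-- A raises ValueError for n ≤ 0 (int() of the empty joined string); Pre_ is
-- exactly where A returns.
def Pre_next_pattern_number (n : Int) : Prop := 1 ≤ n
instance (n : Int) : Decidable (Pre_next_pattern_number n) := by unfold Pre_next_pattern_number; infer_instance
def pvWitness_next_pattern_number : Int := 12

def Spec_next_pattern_number (n : Int) (out : Int) : Prop := out = next_pattern_number_alt n
instance (n : Int) (out : Int) : Decidable (Spec_next_pattern_number n out) := by unfold Spec_next_pattern_number; infer_instance

-- ===== CLAIM (what is proved, stated in full; the proofs are below) =====
def Claim_equal_next_pattern_number : Prop := ∀ (n : Int), Dom_next_pattern_number n → Pre_next_pattern_number n → Spec_next_pattern_number n (next_pattern_number n)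

-- ===== LEMMAS AND PROOFS =====

-- "".join concatenates: joining with the empty separator is flattening.
theorem pvJoinEmpty (parts : List String) :
    PySem.Str.join "" parts = String.ofList (parts.map String.toList).flatten := by
  have h : ∀ l : List (List Char), PySem.Chars.join [] l = l.flatten := by
    intro l
    induction l with
    | nil => simp [PySem.Chars.join, List.intercalate]
    | cons a t ih =>
      cases t with
      | nil => simp [PySem.Chars.join, List.intercalate]
      | cons b r =>
        rw [PySem.Chars.join_cons_cons]
        simp_all
  simp [PySem.Str.join, h]

theorem pvJoinEmptyAppend (l1 l2 : List String) :
    PySem.Str.join "" l1 ++ PySem.Str.join "" l2 = PySem.Str.join "" (l1 ++ l2) := by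
  simp [pvJoinEmpty, String.ofList_append]

-- range(m-1, b-1, -1) is the reverse of range(b, m, 1)
theorem pvRevRange (m b : Int) :
    PySem.List.pyRange (m-1) (b-1) (-1) = (PySem.List.pyRange b m 1).reverse := by
  rw [PySem.List.pyRange_neg_one_eq_reverse]
  norm_num

-- the wrap loop's invariant: folding the wraps of i..(n-1) around str(n)
-- yields the digits of i..n followed by those of (n-1)..i
theorem pvWrapEq (n i : Int) (h : i ≤ n) :
    (PySem.List.pyRange i n 1).foldr
        (fun i s => PySem.Int.toChars i ++ s ++ PySem.Int.toChars i)
        (PySem.Int.toChars n)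
      = ((PySem.List.pyRange i (n+1) 1).map PySem.Int.toChars).flatten
        ++ (((PySem.List.pyRange i n 1).map PySem.Int.toChars).reverse).flatten := by
  by_cases hlt : i < n
  · rw [PySem.List.pyRange_one_cons (by omega : i < n + 1),
      PySem.List.pyRange_one_cons (by omega : i < n), List.foldr_cons,
      pvWrapEq n (i+1) (by omega)]
    simp [List.flatten_append]
  · have hin : i = n := by omega
    subst hin
    rw [PySem.List.pyRange_one_eq_nil (le_refl i), List.foldr_nil,
      PySem.List.pyRange_one_cons (by omega : i < i + 1)]
    simp [PySem.List.pyRange_one_eq_nil]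
termination_by (n - i).toNat
decreasing_by omega

-- under Pre_, the two ports feed int() the same string
theorem pvSameString (n : Int) (h1 : 1 ≤ n) :
    next_pattern_number n = next_pattern_number_alt n := by
  simp only [next_pattern_number, next_pattern_number_alt]
  have hrev : PySem.List.pyRange (n-1) 0 (-1) = (PySem.List.pyRange 1 n 1).reverse := by
    have := pvRevRange n 1; norm_num at this; exact this
  rw [hrev, List.foldl_reverse]
  rw [pvWrapEq n 1 h1]
  by_cases h : n > 9
  · simp only [if_pos h]
    rw [pvJoinEmptyAppend, pvJoinEmptyAppend, ← List.map_append,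
      ← PySem.List.pyRange_one_append 1 10 (n+1) (by omega) (by omega)]
    have hb : PySem.List.pyRange (n-1) 9 (-1) ++ PySem.List.pyRange 9 0 (-1)
        = (PySem.List.pyRange 1 n 1).reverse := by
      have ha : PySem.List.pyRange (n-1) 9 (-1) = (PySem.List.pyRange 10 n 1).reverse := by
        have := pvRevRange n 10; norm_num at this; exact this
      have hc : PySem.List.pyRange 9 0 (-1) = (PySem.List.pyRange 1 10 1).reverse := by
        have := pvRevRange 10 1; norm_num at this; exact this
      rw [ha, hc, ← List.reverse_append,
        ← PySem.List.pyRange_one_append 1 10 n (by omega) (by omega)]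
    rw [← List.map_append, hb]
    simp only [pvJoinEmpty]
    simp [Function.comp_def, PySem.Int.toList_toStr, List.map_reverse, String.ofList_append]
  · simp only [if_neg h]
    simp only [pvJoinEmpty]
    simp [Function.comp_def, PySem.Int.toList_toStr, List.map_reverse, String.ofList_append]

-- ===== VERDICT (by name: the statement is the Claim_ definition above) =====
theorem next_pattern_number_spec : Claim_equal_next_pattern_number := by
  intro n _ hpre
  unfold Spec_next_pattern_number
  exact pvSameString n hpre
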